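-- pv_equiv track=rewrite | github.com/znehAC/GraphRec-example | utils/metrics.py | check_qids
-- ===== SOURCE A (Python) =====
-- def check_qids(qids):
--         seen_qids = set()
--         prev_qid = None
--
--         for qid in qids:
--             assert qid is not None
--             if qid != prev_qid:
--                 if qid in seen_qids:
--                     raise ValueError('Samples must be grouped by qid.')
--                 seen_qids.add(qid)
--                 prev_qid = qid
--
--         return len(seen_qids)
-- ===== SOURCE B (Python) =====
-- def check_qids(qids):
--     for qid in qids:
--         assert qid is not None
--     distinct = len(set(qids))
--     runs = 0 if not qids else 1 + sum(1 for a, b in zip(qids, qids[1:]) if b != a)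
--     if runs != distinct:
--         raise ValueError('Samples must be grouped by qid.')
--     return distinct
-- ===== Notes on version B (the rewrite author's own statement) =====
-- stated objective: alternative
-- what changed: Instead of A's incremental scan (prev-qid boundary detection plus a seen-set duplicate check that raises mid-scan), B computes two aggregate quantities - the number of distinct qids via set() and the number of runs via counting adjacent unequal pairs - and validates grouping by the identity runs == distinct, returning the distinct count.
import Mathlib
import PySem

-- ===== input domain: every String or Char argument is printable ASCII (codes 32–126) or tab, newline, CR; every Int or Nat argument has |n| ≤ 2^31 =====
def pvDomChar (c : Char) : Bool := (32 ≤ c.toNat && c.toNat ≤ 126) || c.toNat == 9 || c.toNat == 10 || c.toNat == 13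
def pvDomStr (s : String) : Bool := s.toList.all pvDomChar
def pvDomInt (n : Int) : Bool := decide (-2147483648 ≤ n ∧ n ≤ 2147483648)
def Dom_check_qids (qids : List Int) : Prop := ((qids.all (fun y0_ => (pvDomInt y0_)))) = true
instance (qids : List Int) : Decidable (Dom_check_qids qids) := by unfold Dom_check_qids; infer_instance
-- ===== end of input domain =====

-- B validates grouping by the global counting identity #runs == #distinct (two aggregate
-- quantities compared once) instead of A's incremental prev-qid/seen-set scan; same O(n) cost.

-- ===== PORT A =====
-- per-element loop with a `prev_qid` state variable; `none` models the ValueError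
def check_qids_goA (qids : List Int) (seen : PySem.Set Int) (prev : Option Int) :
    Option (PySem.Set Int) :=
  match qids with
  | [] => some seen
  | q :: rest =>
    -- `assert qid is not None` cannot fail: qids : List Int
    if some q ≠ prev then
      if PySem.Set.contains seen q then none  -- raise ValueError (excluded by Pre_)
      else check_qids_goA rest (PySem.Set.add seen q) (some q)
    else check_qids_goA rest seen prev

def check_qids (qids : List Int) : Int :=
  match check_qids_goA qids PySem.Set.empty none with
  | some seen => PySem.List.len seen
  | none => 0  -- unreachable under Pre_check_qids (Python raises ValueError)

-- ===== PORT B =====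
def check_qids_alt (qids : List Int) : Int :=
  -- `for qid in qids: assert qid is not None` cannot fail: qids : List Int
  let distinct : Int := PySem.Set.len (PySem.Set.ofList qids)
  let runs : Int :=
    if qids = [] then 0
    else 1 + (qids.zip (PySem.List.slice qids (some 1) none)).foldl
        (fun acc p => if p.2 ≠ p.1 then acc + 1 else acc) 0
  if runs ≠ distinct then 0  -- raise ValueError (excluded by Pre_check_qids)
  else distinct

-- ===== PRECONDITION & SPEC =====
-- Pre_ is exactly "samples are grouped by qid": the run keys (consecutive duplicates collapsed)
-- are pairwise distinct. On lists violating it the Python A (and B) raises ValueError.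
def Pre_check_qids (qids : List Int) : Prop := (qids.destutter (· ≠ ·)).Nodup
instance (qids : List Int) : Decidable (Pre_check_qids qids) := by unfold Pre_check_qids; infer_instance
def pvWitness_check_qids : List Int := [1, 1, 2, 2, 2, 3]

def Spec_check_qids (qids : List Int) (out : Int) : Prop := out = check_qids_alt qids
instance (qids : List Int) (out : Int) : Decidable (Spec_check_qids qids out) := by unfold Spec_check_qids; infer_instance

-- ===== CLAIM (what is proved, stated in full; the proofs are below) =====
def Claim_equal_check_qids : Prop := ∀ (qids : List Int), Dom_check_qids qids → Pre_check_qids qids → Spec_check_qids qids (check_qids qids)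

-- ===== LEMMAS AND PROOFS =====

-- proof-side helper: the first element of each maximal run of equal consecutive elements
def runKeys (qids : List Int) : List Int :=
  match qids with
  | [] => []
  | x :: rest => x :: runKeys (rest.dropWhile (· == x))
termination_by qids.length
decreasing_by simp only [List.length_cons]; exact Nat.lt_succ_of_le (rest.length_dropWhile_le _)

theorem runKeys_cons_cons (x y : Int) (t : List Int) :
    runKeys (x :: y :: t) = if x = y then runKeys (y :: t) else x :: runKeys (y :: t) := by
  by_cases h : x = y
  · subst h
    rw [runKeys, runKeys]
    simp [List.dropWhile]
  · have hb : (y == x) = false := beq_eq_false_iff_ne.mpr (Ne.symm h)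
    rw [runKeys]
    simp [List.dropWhile, hb, h]

theorem runKeys_eq_destutter (qids : List Int) :
    runKeys qids = qids.destutter (· ≠ ·) := by
  match qids with
  | [] => simp [runKeys, List.destutter]
  | [x] => simp [runKeys, List.dropWhile, List.destutter, List.destutter']
  | x :: y :: t =>
    have ih := runKeys_eq_destutter (y :: t)
    rw [runKeys_cons_cons]
    by_cases h : x = y
    · subst h
      rw [if_pos rfl, ih]
      simp [List.destutter, List.destutter']
    · rw [if_neg h, ih]
      simp [List.destutter, List.destutter', h]
termination_by qids.length

theorem mem_runKeys (qids : List Int) (v : Int) : v ∈ runKeys qids ↔ v ∈ qids := by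
  match qids with
  | [] => simp [runKeys]
  | [x] => simp [runKeys, List.dropWhile]
  | x :: y :: t =>
    have ih := mem_runKeys (y :: t) v
    rw [runKeys_cons_cons]
    by_cases h : x = y
    · subst h
      rw [if_pos rfl, ih]
      simp
    · rw [if_neg h, List.mem_cons, ih]
      simp
termination_by qids.length

-- A's loop, once prev = some x, skips the remainder of the current run
theorem goA_skip_run (qids : List Int) (seen : PySem.Set Int) (x : Int) :
    check_qids_goA qids seen (some x) =
      check_qids_goA (qids.dropWhile (· == x)) seen (some x) := by
  induction qids with
  | nil => rfl
  | cons q rest ih =>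
    by_cases h : q = x
    · subst h
      simp [check_qids_goA, List.dropWhile, ih]
    · have hb : (q == x) = false := beq_eq_false_iff_ne.mpr h
      simp [check_qids_goA, hb, h]

-- the set loop A performs on the run keys
def goSet (keys : List Int) (seen : PySem.Set Int) : Option (PySem.Set Int) :=
  match keys with
  | [] => some seen
  | k :: rest =>
    if PySem.Set.contains seen k then none
    else goSet rest (PySem.Set.add seen k)

theorem goA_eq_goSet (n : Nat) : ∀ (qids : List Int), qids.length ≤ n →
    ∀ (seen : PySem.Set Int) (prev : Option Int),
    (∀ x, prev = some x → qids.dropWhile (· == x) = qids) →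
    check_qids_goA qids seen prev = goSet (runKeys qids) seen := by
  induction n with
  | zero =>
    intro qids hlen seen prev _
    have : qids = [] := List.length_eq_zero_iff.mp (Nat.le_zero.mp hlen)
    subst this; simp [check_qids_goA, runKeys, goSet]
  | succ n ih =>
    intro qids hlen seen prev hprev
    match qids with
    | [] => simp [check_qids_goA, runKeys, goSet]
    | q :: rest =>
      have hne : some q ≠ prev := by
        intro h
        have h2 := hprev q h.symm
        simp only [List.dropWhile, BEq.rfl] at h2
        have h3 := congrArg List.length h2
        have hle := rest.length_dropWhile_le (fun x => x == q)
        simp only [List.length_cons] at h3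
        omega
      rw [check_qids_goA, if_pos hne, runKeys, goSet]
      split_ifs with hc
      · rfl
      · rw [goA_skip_run]
        apply ih
        · have h1 : (rest.dropWhile (· == q)).length ≤ rest.length :=
            rest.length_dropWhile_le _
          simp only [List.length_cons] at hlen
          omega
        · intro x hx
          injection hx with hx; subst hx
          exact List.dropWhile_idempotent ..

-- on duplicate-free keys disjoint from seen, the set loop appends all keys
theorem goSet_success (keys : List Int) : ∀ (seen : PySem.Set Int),
    keys.Nodup → (∀ k ∈ keys, k ∉ seen) → goSet keys seen = some (seen ++ keys) := by
  induction keys with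
  | nil => intro seen _ _; simp [goSet]
  | cons k rest ih =>
    intro seen hnd hdisj
    have hk : k ∉ seen := hdisj k (by simp)
    have hc : ¬ (PySem.Set.contains seen k = true) := by
      simp only [PySem.Set.contains_eq_listContains]
      simp [hk]
    rw [goSet, if_neg hc, PySem.Set.add_of_not_mem hk]
    rw [ih (seen ++ [k]) hnd.of_cons]
    · simp
    · intro x hx
      simp only [List.mem_append, List.mem_singleton]
      rintro (h | h)
      · exact hdisj x (by simp [hx]) h
      · exact (List.Nodup.notMem hnd) (h ▸ hx)

-- the boundary-counting fold equals countP
theorem foldl_count_eq_countP (zs : List (Int × Int)) : ∀ (acc : Int),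
    zs.foldl (fun acc p => if p.2 ≠ p.1 then acc + 1 else acc) acc =
      acc + (zs.countP (fun p => !decide (p.2 = p.1)) : Int) := by
  induction zs with
  | nil => intro acc; simp
  | cons z rest ih =>
    intro acc
    rw [List.foldl_cons, List.countP_cons, ih]
    by_cases h : z.2 = z.1
    · simp [h]
    · simp [h]; ring

-- the number of runs equals 1 + the number of adjacent unequal pairs
theorem runKeys_length_eq (qids : List Int) (hne : qids ≠ []) :
    (runKeys qids).length =
      1 + (qids.zip qids.tail).countP (fun p => !decide (p.2 = p.1)) := by
  match qids with
  | [] => exact absurd rfl hne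
  | [x] => simp [runKeys, List.dropWhile]
  | x :: y :: t =>
    have ih := runKeys_length_eq (y :: t) (by simp)
    simp only [List.tail_cons] at ih ⊢
    rw [runKeys_cons_cons]
    by_cases h : x = y
    · subst h
      rw [if_pos rfl, ih]
      simp
    · rw [if_neg h, List.length_cons, ih]
      simp [Ne.symm h]
      omega
termination_by qids.length

-- two duplicate-free lists with the same members have the same length
theorem length_eq_of_nodup_of_mem_iff (l₁ l₂ : List Int) (h₁ : l₁.Nodup) (h₂ : l₂.Nodup)
    (hmem : ∀ x, x ∈ l₁ ↔ x ∈ l₂) : l₁.length = l₂.length := by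
  have : l₁.toFinset = l₂.toFinset := by
    ext x; simp [hmem x]
  calc l₁.length = l₁.toFinset.card := (List.toFinset_card_of_nodup h₁).symm
    _ = l₂.toFinset.card := by rw [this]
    _ = l₂.length := List.toFinset_card_of_nodup h₂

theorem runKeys_length_eq_distinct (qids : List Int) (hnd : (runKeys qids).Nodup) :
    (runKeys qids).length = (PySem.Set.ofList qids).length :=
  length_eq_of_nodup_of_mem_iff _ _ hnd (PySem.Set.nodup_ofList qids)
    (fun x => (mem_runKeys qids x).trans (PySem.Set.mem_ofList qids x).symm)

-- ===== VERDICT (by name: the statement is the Claim_ definition above) =====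
theorem check_qids_spec : Claim_equal_check_qids := by
  intro qids _ hpre
  unfold Spec_check_qids
  have hnd : (runKeys qids).Nodup := by
    rw [runKeys_eq_destutter]; exact hpre
  -- A's value
  have hA : check_qids qids = ((runKeys qids).length : Int) := by
    unfold check_qids
    rw [goA_eq_goSet qids.length qids (le_refl _) PySem.Set.empty none (by intro x h; cases h)]
    rw [goSet_success _ _ hnd (by intro k _ hk; simp [PySem.Set.empty] at hk)]
    simp [PySem.List.len_eq, PySem.Set.empty]
  -- B's value
  rw [hA]
  unfold check_qids_alt
  by_cases hq : qids = []
  · subst hq; simp [runKeys]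
  · have hlen := runKeys_length_eq qids hq
    have hdist := runKeys_length_eq_distinct qids hnd
    rw [if_neg hq, PySem.List.slice_from_one, foldl_count_eq_countP]
    have hd2 : PySem.Set.len (PySem.Set.ofList qids) = ((runKeys qids).length : Int) := by
      simp [PySem.Set.len, hdist]
    have hr : (1 : Int) + ((0 : Int) +
        (((qids.zip qids.tail).countP (fun p => !decide (p.2 = p.1)) : Nat) : Int)) =
        ((runKeys qids).length : Int) := by
      rw [hlen]; push_cast; ring
    rw [hd2, hr]
    simp
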